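-- pv_equiv track=rewrite | github.com/karenb54/ElSol-Challenge | services/transcription_service.py | _needs_follow_up
-- ===== SOURCE A (Python) =====
-- def _needs_follow_up(text: str) -> bool:
--     """Determina si necesita seguimiento"""
--     follow_up_indicators = [
--         'quiero saber', 'necesito ayuda', 'qué debo hacer',
--         'cómo puedo', 'cuándo debo', 'dónde debo ir',
--         'consulta', 'cita', 'seguimiento'
--     ]
--
--     text_lower = text.lower()
--     return any(indicator in text_lower for indicator in follow_up_indicators)
-- ===== SOURCE B (Python) =====
-- def _needs_follow_up(text: str) -> bool:
--     """Determina si necesita seguimiento"""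
--     follow_up_indicators = [
--         'quiero saber', 'necesito ayuda', 'qué debo hacer',
--         'cómo puedo', 'cuándo debo', 'dónde debo ir',
--         'consulta', 'cita', 'seguimiento'
--     ]
--
--     # single left-to-right pass with a worklist of in-progress partial matches
--     # (NFA-style multi-pattern scan): no character is ever rescanned by 'in'
--     active = []
--     for ch in text.lower():
--         cand = active + follow_up_indicators
--         if any(s == ch for s in cand):
--             return True
--         active = [s[1:] for s in cand if s[0] == ch and len(s) > 1]
--     return False
-- ===== Notes on version B (the rewrite author's own statement) =====
-- stated objective: alternative
-- what changed: Replaces nine independent per-indicator substring scans of the lowercased text with one left-to-right pass that maintains a worklist of in-progress partial matches (NFA-style multi-pattern scan), returning as soon as a partial match completes.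
import Mathlib
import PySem

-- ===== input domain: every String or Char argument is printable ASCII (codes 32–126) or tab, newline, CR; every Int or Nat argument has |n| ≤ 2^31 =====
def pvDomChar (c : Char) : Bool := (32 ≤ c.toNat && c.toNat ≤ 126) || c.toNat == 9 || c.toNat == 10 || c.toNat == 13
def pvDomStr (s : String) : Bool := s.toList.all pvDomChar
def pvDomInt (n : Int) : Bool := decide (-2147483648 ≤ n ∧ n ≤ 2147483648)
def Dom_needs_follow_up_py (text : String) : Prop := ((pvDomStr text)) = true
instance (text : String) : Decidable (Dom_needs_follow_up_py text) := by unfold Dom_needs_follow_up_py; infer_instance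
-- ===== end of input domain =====

-- B replaces the nine independent substring scans by a single left-to-right pass that carries a
-- worklist of in-progress partial matches (objective: alternative, same asymptotic cost).

-- ===== PORT A =====
def needs_follow_up_py (text : String) : Bool :=
  let follow_up_indicators : List String :=
    ["quiero saber", "necesito ayuda", "qué debo hacer",
     "cómo puedo", "cuándo debo", "dónde debo ir",
     "consulta", "cita", "seguimiento"]
  let text_lower := PySem.Str.lower text
  follow_up_indicators.any (fun indicator => PySem.Str.isIn indicator text_lower)

-- ===== PORT B =====
def pvIndicators : List (List Char) :=
  ["quiero saber".toList, "necesito ayuda".toList, "qué debo hacer".toList,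
   "cómo puedo".toList, "cuándo debo".toList, "dónde debo ir".toList,
   "consulta".toList, "cita".toList, "seguimiento".toList]

-- the loop of Source B: state `active` holds the remaining suffixes of partial matches in progress
def pvScan (inds : List (List Char)) : List Char → List (List Char) → Bool
  | [], _active => false
  | c :: rest, active =>
      let cand := active ++ inds
      if cand.any (fun s => s == [c]) then true
      else pvScan inds rest (cand.filterMap (fun s =>
            match s with
            | [] => none
            | c' :: t => if c' == c && decide (t ≠ []) then some t else none))

def needs_follow_up_py_alt (text : String) : Bool :=
  pvScan pvIndicators (PySem.Str.lower text).toList []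

-- ===== PRECONDITION & SPEC =====
def Spec_needs_follow_up_py (text : String) (out : Bool) : Prop := out = needs_follow_up_py_alt text
instance (text : String) (out : Bool) : Decidable (Spec_needs_follow_up_py text out) := by unfold Spec_needs_follow_up_py; infer_instance

-- ===== CLAIM (what is proved, stated in full; the proofs are below) =====
def Claim_equal_needs_follow_up_py : Prop := ∀ (text : String), Dom_needs_follow_up_py text → Spec_needs_follow_up_py text (needs_follow_up_py text)

-- ===== LEMMAS AND PROOFS =====

-- loop invariant: the scan succeeds iff some worklist suffix is a prefix of the remaining text,
-- or some (nonempty) indicator occurs as an infix of the remaining text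
theorem pvScan_iff (inds : List (List Char)) (l : List Char) (active : List (List Char)) :
    pvScan inds l active = true ↔
      (∃ s ∈ active, s ≠ [] ∧ s <+: l) ∨ (∃ a ∈ inds, a ≠ [] ∧ a <:+: l) := by
  induction l generalizing active with
  | nil =>
      simp only [pvScan]
      constructor
      · intro h; cases h
      · rintro (⟨s, _, hs, hp⟩ | ⟨a, _, ha, hi⟩)
        · exact absurd (List.prefix_nil.mp hp) hs
        · exact absurd ((List.infix_nil).mp hi) ha
  | cons c rest ih =>
      simp only [pvScan]
      split_ifs with h
      · simp only [true_iff]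
        obtain ⟨s, hs, heq⟩ := List.any_eq_true.mp h
        have hseq : s = [c] := by simpa using heq
        subst hseq
        have hpre : [c] <+: c :: rest := List.cons_prefix_cons.mpr ⟨rfl, List.nil_prefix⟩
        rcases List.mem_append.mp hs with hm | hm
        · exact Or.inl ⟨[c], hm, by simp, hpre⟩
        · exact Or.inr ⟨[c], hm, by simp, hpre.isInfix⟩
      · rw [ih]
        constructor
        · rintro (⟨t, ht, htne, htp⟩ | ⟨a, ha, hane, hai⟩)
          · -- a worklist suffix t came from some s = c :: t in the candidates
            obtain ⟨s, hs, hf⟩ := List.mem_filterMap.mp ht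
            match s, hf with
            | c' :: t', hf =>
              simp only at hf
              split_ifs at hf with hc
              · cases hf
                have hcc : c' = c := by
                  have := (Bool.and_eq_true _ _).mp hc
                  simpa using this.1
                subst hcc
                have hpre : (c' :: t) <+: c' :: rest := List.cons_prefix_cons.mpr ⟨rfl, htp⟩
                rcases List.mem_append.mp hs with hm | hm
                · exact Or.inl ⟨c' :: t, hm, by simp, hpre⟩
                · exact Or.inr ⟨c' :: t, hm, by simp, hpre.isInfix⟩
          · exact Or.inr ⟨a, ha, hane, (List.infix_cons_iff).mpr (Or.inr hai)⟩
        · rintro (⟨s, hm, hsne, hsp⟩ | ⟨a, ha, hane, hai⟩)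
          · -- s ≠ [c] (else the any-branch fired), so s = c :: t with t ≠ []
            match s, hsne with
            | c' :: t, _ =>
              obtain ⟨hcc, htp⟩ := List.cons_prefix_cons.mp hsp
              subst hcc
              have hne : t ≠ [] := by
                intro htnil; subst htnil
                exact h (List.any_eq_true.mpr
                  ⟨c' :: [], List.mem_append.mpr (Or.inl hm), by simp⟩)
              refine Or.inl ⟨t, ?_, hne, htp⟩
              exact List.mem_filterMap.mpr
                ⟨c' :: t, List.mem_append.mpr (Or.inl hm), by simp [hne]⟩
          · rcases (List.infix_cons_iff).mp hai with hp | hi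
            · match a, hane with
              | c' :: t, _ =>
                obtain ⟨hcc, htp⟩ := List.cons_prefix_cons.mp hp
                subst hcc
                by_cases hne : t = []
                · subst hne
                  exact absurd (List.any_eq_true.mpr
                    ⟨c' :: [], List.mem_append.mpr (Or.inr ha), by simp⟩) h
                · refine Or.inl ⟨t, ?_, hne, htp⟩
                  exact List.mem_filterMap.mpr
                    ⟨c' :: t, List.mem_append.mpr (Or.inr ha), by simp [hne]⟩
            · exact Or.inr ⟨a, ha, hane, hi⟩

-- ===== VERDICT (by name: the statement is the Claim_ definition above) =====
theorem needs_follow_up_py_spec : Claim_equal_needs_follow_up_py := by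
  intro text _
  unfold Spec_needs_follow_up_py needs_follow_up_py needs_follow_up_py_alt
  rw [Bool.eq_iff_iff, pvScan_iff]
  simp [pvIndicators, PySem.Chars.isIn_iff_infix]
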